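-- pv_equiv track=rewrite | github.com/sc420/funghi-den-adventure | funghi-den-adventure/calc.py | is_reduce_requirement_met
-- ===== SOURCE A (Python) =====
-- def is_reduce_requirement_met(data, requirement, augmented_funghis):
--     if not 'reduce_stats' in requirement:
--         return True
--     req_reduce_stats = requirement['reduce_stats']
--     # Check each reduce stats
--     for stat_name, reduce_target in req_reduce_stats.items():
--         reduced_sum = 0
--         # Calculate the reduced value from all funghis
--         for funghi in augmented_funghis:
--             funghi_stats = funghi['stats']
--             if stat_name in funghi_stats:
--                 reduced_sum += funghi_stats[stat_name]
--         # Check whether the reduced sum passes the requirement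
--         if reduced_sum < reduce_target:
--             return False
--     # All funghis have passed the reduce targets, the requirement is met
--     return True
-- ===== SOURCE B (Python) =====
-- def is_reduce_requirement_met(data, requirement, augmented_funghis):
--     if 'reduce_stats' not in requirement:
--         return True
--     targets = requirement['reduce_stats']
--     if not targets:
--         return True
--     # Single aggregation pass: merge every funghi's stats into one totals dict
--     totals = {}
--     for funghi in augmented_funghis:
--         for name, value in funghi['stats'].items():
--             totals[name] = totals.get(name, 0) + value
--     # Single check pass over the targets
--     return all(totals.get(name, 0) >= target for name, target in targets.items())
-- ===== Notes on version B (the rewrite author's own statement) =====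
-- stated objective: alternative
-- what changed: Instead of one full scan of augmented_funghis per required stat, B makes a single aggregation pass merging every funghi's stats into one totals dict and then a single check pass over the targets; it avoids re-reading each funghi's stats dict per stat, at the cost of summing stats that no target asks for.
import Mathlib
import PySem

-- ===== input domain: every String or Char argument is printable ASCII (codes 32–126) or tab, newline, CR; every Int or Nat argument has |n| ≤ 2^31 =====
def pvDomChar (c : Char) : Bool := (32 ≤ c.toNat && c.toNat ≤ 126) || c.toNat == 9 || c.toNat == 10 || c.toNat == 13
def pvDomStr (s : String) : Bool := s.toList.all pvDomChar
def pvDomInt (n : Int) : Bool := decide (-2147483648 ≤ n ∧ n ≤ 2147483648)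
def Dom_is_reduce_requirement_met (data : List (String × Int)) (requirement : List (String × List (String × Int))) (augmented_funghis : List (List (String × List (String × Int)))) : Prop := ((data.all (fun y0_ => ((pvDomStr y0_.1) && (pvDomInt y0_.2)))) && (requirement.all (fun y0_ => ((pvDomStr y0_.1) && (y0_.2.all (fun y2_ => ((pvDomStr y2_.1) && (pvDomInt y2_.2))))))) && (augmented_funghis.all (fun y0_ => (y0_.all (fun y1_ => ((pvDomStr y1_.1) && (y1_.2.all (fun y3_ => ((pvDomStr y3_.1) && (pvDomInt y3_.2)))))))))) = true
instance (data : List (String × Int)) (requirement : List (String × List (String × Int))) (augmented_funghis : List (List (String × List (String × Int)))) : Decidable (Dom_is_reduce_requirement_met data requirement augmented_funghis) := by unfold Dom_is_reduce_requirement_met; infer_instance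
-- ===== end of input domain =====

-- B aggregates all funghi stats into one totals dict in a single pass (after an early True on empty targets)
-- and then checks the reduce targets in one pass, instead of scanning all funghis once per required stat
-- (a different decomposition, same measured cost).


-- ===== PORT A =====
-- funghi['stats'] as a dict (Pre_ guarantees the key is present whenever it is read; getD [] is only a totalizer)
def pvStatsDict (funghi : List (String × List (String × Int))) : PySem.Dict String Int :=
  PySem.Dict.ofList ((PySem.Dict.ofList funghi).getD "stats" [])

-- A's outer loop over req_reduce_stats.items() with its early 'return False'
def pvCheckA (items : List (String × Int)) (augmented_funghis : List (List (String × List (String × Int)))) : Bool :=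
  match items with
  | [] => true
  | (stat_name, reduce_target) :: rest =>
      let reduced_sum := augmented_funghis.foldl (fun acc funghi =>
          let funghi_stats := pvStatsDict funghi
          if funghi_stats.contains stat_name then acc + funghi_stats.getD stat_name 0 else acc) 0
      if reduced_sum < reduce_target then false else pvCheckA rest augmented_funghis

def is_reduce_requirement_met (data : List (String × Int)) (requirement : List (String × List (String × Int))) (augmented_funghis : List (List (String × List (String × Int)))) : Bool :=
  let req := PySem.Dict.ofList requirement
  if req.contains "reduce_stats" = false then true
  else pvCheckA (PySem.Dict.ofList (req.getD "reduce_stats" [])).items augmented_funghis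

-- ===== PORT B =====
def is_reduce_requirement_met_alt (data : List (String × Int)) (requirement : List (String × List (String × Int))) (augmented_funghis : List (List (String × List (String × Int)))) : Bool :=
  let req := PySem.Dict.ofList requirement
  if req.contains "reduce_stats" = false then true
  else
    let targets := PySem.Dict.ofList (req.getD "reduce_stats" [])
    if targets.items.isEmpty then true
    else
      let totals := augmented_funghis.foldl (fun totals funghi =>
          (pvStatsDict funghi).items.foldl (fun t p => t.modify p.1 0 (· + p.2)) totals)
        PySem.Dict.empty
      targets.items.all (fun p => decide (p.2 ≤ totals.getD p.1 0))

-- ===== PRECONDITION & SPEC =====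
-- Pre_ excludes exactly the inputs on which Python A raises KeyError: a non-empty 'reduce_stats'
-- dict together with some funghi lacking a 'stats' key (A reads funghi['stats'] for every funghi
-- while summing the first required stat; B raises the same KeyError there).
def Pre_is_reduce_requirement_met (data : List (String × Int)) (requirement : List (String × List (String × Int))) (augmented_funghis : List (List (String × List (String × Int)))) : Prop :=
  ("reduce_stats" ∈ requirement.map (fun p => p.1) ∧
     (PySem.Dict.ofList requirement).getD "reduce_stats" [] ≠ []) →
    ∀ funghi ∈ augmented_funghis, "stats" ∈ funghi.map (fun p => p.1)
instance (data : List (String × Int)) (requirement : List (String × List (String × Int))) (augmented_funghis : List (List (String × List (String × Int)))) : Decidable (Pre_is_reduce_requirement_met data requirement augmented_funghis) := by unfold Pre_is_reduce_requirement_met; infer_instance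

def pvWitness_is_reduce_requirement_met : (List (String × Int)) × (List (String × List (String × Int))) × (List (List (String × List (String × Int)))) :=
  ([("a", 1)], [("reduce_stats", [("hp", 3)])], [[("stats", [("hp", 5)])]])

def Spec_is_reduce_requirement_met (data : List (String × Int)) (requirement : List (String × List (String × Int))) (augmented_funghis : List (List (String × List (String × Int)))) (out : Bool) : Prop := out = is_reduce_requirement_met_alt data requirement augmented_funghis
instance (data : List (String × Int)) (requirement : List (String × List (String × Int))) (augmented_funghis : List (List (String × List (String × Int)))) (out : Bool) : Decidable (Spec_is_reduce_requirement_met data requirement augmented_funghis out) := by unfold Spec_is_reduce_requirement_met; infer_instance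

-- ===== CLAIM (what is proved, stated in full; the proofs are below) =====
def Claim_equal_is_reduce_requirement_met : Prop := ∀ (data : List (String × Int)) (requirement : List (String × List (String × Int))) (augmented_funghis : List (List (String × List (String × Int)))), Dom_is_reduce_requirement_met data requirement augmented_funghis → Pre_is_reduce_requirement_met data requirement augmented_funghis → Spec_is_reduce_requirement_met data requirement augmented_funghis (is_reduce_requirement_met data requirement augmented_funghis)

-- ===== LEMMAS AND PROOFS =====

-- a keyed sum over a list without repeated keys is the dict lookup (default 0)
theorem pv_sum_zero (l : List (String × Int)) (n : String) (h : n ∉ l.map (fun p => p.1)) :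
    (l.map (fun p => if p.1 = n then p.2 else (0 : Int))).sum = 0 := by
  apply List.sum_eq_zero
  intro x hx
  rcases List.mem_map.mp hx with ⟨p, hp, rfl⟩
  have hne : p.1 ≠ n := fun e => h (List.mem_map.mpr ⟨p, hp, e⟩)
  simp [hne]

theorem pv_keySum (l : List (String × Int)) (n : String) (h : (l.map (fun p => p.1)).Nodup) :
    (l.map (fun p => if p.1 = n then p.2 else (0 : Int))).sum = (PySem.Dict.mk l).getD n 0 := by
  induction l with
  | nil => simp [PySem.Dict.getD, PySem.Dict.get?]
  | cons a t ih =>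
    obtain ⟨k, v⟩ := a
    simp only [List.map_cons, List.nodup_cons] at h
    obtain ⟨hk, ht⟩ := h
    rw [List.map_cons, List.sum_cons, PySem.Dict.getD_eq_get?_getD, PySem.Dict.get?_mk_cons]
    by_cases e : k = n
    · subst e
      have h0 := pv_sum_zero t k hk
      simp [h0]
    · have hb : (k == n) = false := by simp [e]
      rw [hb]
      simp only [Bool.false_eq_true, if_false]
      rw [← PySem.Dict.getD_eq_get?_getD, ← ih ht]
      simp [e]

theorem pv_modify_fold (l : List (String × Int)) (d : PySem.Dict String Int) (n : String) :
    (l.foldl (fun t p => t.modify p.1 0 (· + p.2)) d).getD n 0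
      = d.getD n 0 + (l.map (fun p => if p.1 = n then p.2 else (0 : Int))).sum := by
  induction l generalizing d with
  | nil => simp
  | cons p t ih =>
    simp only [List.foldl_cons, List.map_cons, List.sum_cons]
    rw [ih, PySem.Dict.getD_modify]
    by_cases e : n = p.1
    · simp [e]
      ring
    · have e' : p.1 ≠ n := fun h => e h.symm
      simp only [if_neg e, if_neg e']
      ring

theorem pv_stats_keys_nodup (f : List (String × List (String × Int))) :
    ((pvStatsDict f).items.map (fun p => p.1)).Nodup :=
  PySem.Dict.nodup_keys_ofList _

theorem pv_outer (fs : List (List (String × List (String × Int)))) (d : PySem.Dict String Int) (n : String) :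
    (fs.foldl (fun totals funghi =>
        (pvStatsDict funghi).items.foldl (fun t p => t.modify p.1 0 (· + p.2)) totals) d).getD n 0
      = d.getD n 0 + (fs.map (fun f => (pvStatsDict f).getD n 0)).sum := by
  induction fs generalizing d with
  | nil => simp
  | cons f t ih =>
    simp only [List.foldl_cons, List.map_cons, List.sum_cons]
    rw [ih, pv_modify_fold, pv_keySum _ _ (pv_stats_keys_nodup f)]
    ring

theorem pv_Asum (fs : List (List (String × List (String × Int)))) (n : String) (acc : Int) :
    fs.foldl (fun acc funghi =>
        let funghi_stats := pvStatsDict funghi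
        if funghi_stats.contains n then acc + funghi_stats.getD n 0 else acc) acc
      = acc + (fs.map (fun f => (pvStatsDict f).getD n 0)).sum := by
  induction fs generalizing acc with
  | nil => simp
  | cons f t ih =>
    simp only [List.foldl_cons, List.map_cons, List.sum_cons]
    rw [ih]
    by_cases c : (pvStatsDict f).contains n
    · simp [c]
      ring
    · have c' : (pvStatsDict f).contains n = false := by simpa using c
      have h0 : (pvStatsDict f).getD n 0 = 0 := PySem.Dict.getD_of_not_contains _ _ c'
      simp [c', h0]

theorem pv_checkA_eq (items : List (String × Int)) (fs : List (List (String × List (String × Int)))) :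
    pvCheckA items fs
      = items.all (fun p => decide (p.2 ≤ (fs.map (fun f => (pvStatsDict f).getD p.1 0)).sum)) := by
  induction items with
  | nil => rfl
  | cons p t ih =>
    obtain ⟨n, tg⟩ := p
    rw [List.all_cons]
    show (if (fs.foldl (fun acc funghi =>
        let funghi_stats := pvStatsDict funghi
        if funghi_stats.contains n then acc + funghi_stats.getD n 0 else acc) 0) < tg
        then false else pvCheckA t fs) = _
    rw [pv_Asum, zero_add, ih]
    by_cases h : (fs.map (fun f => (pvStatsDict f).getD n 0)).sum < tg
    · simp [h, not_le.mpr h]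
    · simp [h, not_lt.mp h]

-- ===== VERDICT (by name: the statement is the Claim_ definition above) =====
theorem is_reduce_requirement_met_spec : Claim_equal_is_reduce_requirement_met := by
  intro data requirement augmented_funghis _hdom _hpre
  unfold Spec_is_reduce_requirement_met is_reduce_requirement_met is_reduce_requirement_met_alt
  by_cases hc : (PySem.Dict.ofList requirement).contains "reduce_stats" = false
  · simp [hc]
  · simp only [if_neg hc]
    by_cases he : (PySem.Dict.ofList ((PySem.Dict.ofList requirement).getD "reduce_stats" [])).items.isEmpty
    · rw [List.isEmpty_iff] at he
      simp [he, pvCheckA]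
    · have he' : (PySem.Dict.ofList ((PySem.Dict.ofList requirement).getD "reduce_stats" [])).items.isEmpty = false := by
        simpa using he
      simp only [he', Bool.false_eq_true, if_false]
      rw [pv_checkA_eq]
      apply List.all_congr rfl
      intro p
      rw [pv_outer]
      simp
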